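-- pv_equiv track=rewrite | github.com/sakthisahana/EXPOSED-API-SCANNERS | backend/app/services/ai_service.py | _prioritize_mitigations
-- ===== SOURCE A (Python) =====
-- from typing import Dict, List
--
-- def _prioritize_mitigations(mitigations: List[Dict]) -> List[Dict]:
--     """
--     Remove duplicates and sort by priority
--     """
--     # Remove duplicates based on action name
--     seen = set()
--     unique_mitigations = []
--
--     for mitigation in mitigations:
--         action = mitigation["action"]
--         if action not in seen:
--             seen.add(action)
--             unique_mitigations.append(mitigation)
--
--     # Sort by priority
--     priority_order = {"IMMEDIATE": 0, "HIGH": 1, "MEDIUM": 2, "LOW": 3}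
--     unique_mitigations.sort(key=lambda x: priority_order.get(x["priority"], 4))
--
--     return unique_mitigations
-- ===== SOURCE B (Python) =====
-- def _prioritize_mitigations(mitigations):
--     """
--     Remove duplicates and sort by priority (single pass, bucket/counting sort).
--     """
--     priority_order = {"IMMEDIATE": 0, "HIGH": 1, "MEDIUM": 2, "LOW": 3}
--     buckets = [[], [], [], [], []]
--     seen = set()
--     for mitigation in mitigations:
--         action = mitigation["action"]
--         if action not in seen:
--             seen.add(action)
--             buckets[priority_order.get(mitigation["priority"], 4)].append(mitigation)
--     return buckets[0] + buckets[1] + buckets[2] + buckets[3] + buckets[4]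
-- ===== Notes on version B (the rewrite author's own statement) =====
-- stated objective: faster
-- what changed: Replaces dedup-then-stable-sort with a single pass that deduplicates and drops each mitigation into one of five priority buckets (counting sort), returning the concatenated buckets.
import Mathlib
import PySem

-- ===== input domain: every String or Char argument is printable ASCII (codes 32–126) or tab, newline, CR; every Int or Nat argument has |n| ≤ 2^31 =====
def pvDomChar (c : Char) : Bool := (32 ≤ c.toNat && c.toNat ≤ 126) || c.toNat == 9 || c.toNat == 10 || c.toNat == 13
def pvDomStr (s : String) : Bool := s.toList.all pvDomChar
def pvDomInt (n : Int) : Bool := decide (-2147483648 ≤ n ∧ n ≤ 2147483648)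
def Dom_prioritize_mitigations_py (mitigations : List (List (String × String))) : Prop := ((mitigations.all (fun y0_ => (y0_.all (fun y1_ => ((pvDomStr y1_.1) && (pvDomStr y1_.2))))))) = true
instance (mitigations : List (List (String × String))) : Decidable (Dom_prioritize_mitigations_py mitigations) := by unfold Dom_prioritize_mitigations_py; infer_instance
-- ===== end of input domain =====

-- ===== PORT A =====
-- B replaces A's dedup-then-stable-sort with one dedup pass into five priority
-- buckets whose concatenation is the sorted order (objective: faster).

-- m["priority"]-style first-match lookup on the association list (key presence is Pre_'s job)
def pvGetKey (m : List (String × String)) (k : String) : String :=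
  ((PySem.Dict.mk m).get? k).getD ""

def pvPriorityOrder : PySem.Dict String Int :=
  PySem.Dict.ofList [("IMMEDIATE", 0), ("HIGH", 1), ("MEDIUM", 2), ("LOW", 3)]

-- sort key of A: priority_order.get(x["priority"], 4)
def pvKey (m : List (String × String)) : Int :=
  pvPriorityOrder.getD (pvGetKey m "priority") 4

-- the dedup loop of A: state (seen, unique_mitigations)
def pvDedupStep (st : PySem.Set String × List (List (String × String)))
    (m : List (String × String)) : PySem.Set String × List (List (String × String)) :=
  let action := pvGetKey m "action"
  if st.1.contains action then st else (st.1.add action, st.2 ++ [m])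

def prioritize_mitigations_py (mitigations : List (List (String × String))) :
    List (List (String × String)) :=
  let st := mitigations.foldl pvDedupStep (PySem.Set.ofList [], [])
  PySem.List.sorted st.2 pvKey false

-- ===== PORT B =====
-- state of B's single pass: (seen, buckets[0], …, buckets[4])
def pvBState : Type :=
  PySem.Set String × List (List (String × String)) × List (List (String × String)) ×
    List (List (String × String)) × List (List (String × String)) × List (List (String × String))

-- one iteration of B's loop: dedup, then buckets[priority_order.get(m["priority"], 4)].append(m)
def pvBucketStep (st : pvBState) (m : List (String × String)) : pvBState :=
  let action := pvGetKey m "action"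
  if st.1.contains action then st
  else
    let idx := pvKey m
    let st' := (st.1.add action, st.2.1, st.2.2.1, st.2.2.2.1, st.2.2.2.2.1, st.2.2.2.2.2)
    if idx = 0 then (st'.1, st'.2.1 ++ [m], st'.2.2.1, st'.2.2.2.1, st'.2.2.2.2.1, st'.2.2.2.2.2)
    else if idx = 1 then (st'.1, st'.2.1, st'.2.2.1 ++ [m], st'.2.2.2.1, st'.2.2.2.2.1, st'.2.2.2.2.2)
    else if idx = 2 then (st'.1, st'.2.1, st'.2.2.1, st'.2.2.2.1 ++ [m], st'.2.2.2.2.1, st'.2.2.2.2.2)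
    else if idx = 3 then (st'.1, st'.2.1, st'.2.2.1, st'.2.2.2.1, st'.2.2.2.2.1 ++ [m], st'.2.2.2.2.2)
    else (st'.1, st'.2.1, st'.2.2.1, st'.2.2.2.1, st'.2.2.2.2.1, st'.2.2.2.2.2 ++ [m])

def prioritize_mitigations_py_alt (mitigations : List (List (String × String))) :
    List (List (String × String)) :=
  let st := mitigations.foldl pvBucketStep (PySem.Set.ofList [], [], [], [], [], [])
  st.2.1 ++ st.2.2.1 ++ st.2.2.2.1 ++ st.2.2.2.2.1 ++ st.2.2.2.2.2

-- ===== PRECONDITION & SPEC =====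
-- Pre_ excludes exactly the inputs where the Python A raises KeyError: a mitigation without an
-- "action" key, or a first-occurrence mitigation (the ones that survive dedup) without a
-- "priority" key (the sort key accesses x["priority"]).
def Pre_prioritize_mitigations_py (mitigations : List (List (String × String))) : Prop :=
  (∀ m ∈ mitigations, m.any (fun p => p.1 == "action") = true) ∧
  (∀ (i : Nat) (hi : i < mitigations.length),
     (∀ (j : Nat), j < i → pvGetKey (mitigations[j]!) "action" ≠ pvGetKey (mitigations[i]) "action") →
     (mitigations[i]).any (fun p => p.1 == "priority") = true)
instance (mitigations : List (List (String × String))) : Decidable (Pre_prioritize_mitigations_py mitigations) := by unfold Pre_prioritize_mitigations_py; infer_instance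

def pvWitness_prioritize_mitigations_py : (List (List (String × String))) :=
  [[("action", "patch"), ("priority", "HIGH")],
   [("action", "scan"), ("priority", "LOW")],
   [("action", "patch"), ("priority", "LOW")]]

def Spec_prioritize_mitigations_py (mitigations : List (List (String × String))) (out : List (List (String × String))) : Prop := out = prioritize_mitigations_py_alt mitigations
instance (mitigations : List (List (String × String))) (out : List (List (String × String))) : Decidable (Spec_prioritize_mitigations_py mitigations out) := by unfold Spec_prioritize_mitigations_py; infer_instance

-- ===== CLAIM (what is proved, stated in full; the proofs are below) =====
def Claim_equal_prioritize_mitigations_py : Prop := ∀ (mitigations : List (List (String × String))), Dom_prioritize_mitigations_py mitigations → Pre_prioritize_mitigations_py mitigations → Spec_prioritize_mitigations_py mitigations (prioritize_mitigations_py mitigations)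

-- ===== LEMMAS AND PROOFS =====

-- the sort key always lands in {0,1,2,3,4}
theorem pvGetD_mem (s : String) :
    pvPriorityOrder.getD s 4 = 0 ∨ pvPriorityOrder.getD s 4 = 1 ∨ pvPriorityOrder.getD s 4 = 2 ∨
      pvPriorityOrder.getD s 4 = 3 ∨ pvPriorityOrder.getD s 4 = 4 := by
  have hit : pvPriorityOrder.items = [("IMMEDIATE", (0 : Int)), ("HIGH", 1), ("MEDIUM", 2), ("LOW", 3)] := by rfl
  simp only [PySem.Dict.getD, PySem.Dict.get?, hit]
  cases hf : List.find? (fun p => p.1 == s) [("IMMEDIATE", (0 : Int)), ("HIGH", 1), ("MEDIUM", 2), ("LOW", 3)] with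
  | none => simp
  | some p =>
      have hp := List.mem_of_find?_eq_some hf
      simp only [List.mem_cons, List.not_mem_nil, or_false] at hp
      rcases hp with rfl | rfl | rfl | rfl <;> simp

theorem pvKey_cases (m : List (String × String)) :
    pvKey m = 0 ∨ pvKey m = 1 ∨ pvKey m = 2 ∨ pvKey m = 3 ∨ pvKey m = 4 := by
  unfold pvKey; exact pvGetD_mem _

-- bucket j of a list, under the sort key
def pvF (j : Int) (u : List (List (String × String))) : List (List (String × String)) :=
  u.filter (fun m => pvKey m == j)

theorem pvF_append (j : Int) (u : List (List (String × String))) (x : List (String × String)) :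
    pvF j (u ++ [x]) = pvF j u ++ (if pvKey x == j then [x] else []) := by
  simp [pvF, List.filter_append, List.filter_cons]

theorem pvMem_pvF {j : Int} {u : List (List (String × String))} {a : List (String × String)}
    (h : a ∈ pvF j u) : pvKey a = j := by
  have := List.of_mem_filter h
  simpa using this

theorem pvInsertBy_skip {α : Type} (f : α → α → Bool) (x : α) (L R : List α)
    (h : ∀ a ∈ L, f x a = false) :
    PySem.List.insertBy f x (L ++ R) = L ++ PySem.List.insertBy f x R := by
  induction L with
  | nil => simp
  | cons y ys ih =>
      have hy : f x y = false := h y (by simp)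
      simp [PySem.List.insertBy, hy]
      exact ih (fun a ha => h a (by simp [ha]))

theorem pvInsertBy_front {α : Type} (f : α → α → Bool) (x : α) (R : List α)
    (h : ∀ a ∈ R, f x a = true) :
    PySem.List.insertBy f x R = x :: R := by
  cases R with
  | nil => simp [PySem.List.insertBy]
  | cons y ys => simp [PySem.List.insertBy, h y (by simp)]

theorem pvInsertBy_last {α : Type} (f : α → α → Bool) (x : α) (R : List α)
    (h : ∀ a ∈ R, f x a = false) :
    PySem.List.insertBy f x R = R ++ [x] := by
  induction R with
  | nil => simp [PySem.List.insertBy]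
  | cons y ys ih =>
      simp [PySem.List.insertBy, h y (by simp)]
      exact ih (fun a ha => h a (by simp [ha]))

-- A's stable sort of u is the concatenation of the five buckets of u
theorem pvSorted_eq_buckets (u : List (List (String × String))) :
    PySem.List.sorted u pvKey false = pvF 0 u ++ pvF 1 u ++ pvF 2 u ++ pvF 3 u ++ pvF 4 u := by
  induction u using List.reverseRecOn with
  | nil => simp [PySem.List.sorted, pvF]
  | append_singleton u x ih =>
      rw [PySem.List.sorted_eq_foldl_insertBy] at ih ⊢
      rw [List.foldl_append, List.foldl_cons, List.foldl_nil, ih,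
        pvF_append, pvF_append, pvF_append, pvF_append, pvF_append]
      have hskip : ∀ (L : List (List (String × String))),
          (∀ a ∈ L, pvKey a ≤ pvKey x) →
          ∀ a ∈ L, (fun a b => decide (pvKey a < pvKey b)) x a = false := by
        intro L hL a ha
        simp only [decide_eq_false_iff_not, not_lt]
        exact hL a ha
      have hfront : ∀ (R : List (List (String × String))),
          (∀ a ∈ R, pvKey x < pvKey a) →
          ∀ a ∈ R, (fun a b => decide (pvKey a < pvKey b)) x a = true := by
        intro R hR a ha
        simp only [decide_eq_true_eq]
        exact hR a ha
      rcases pvKey_cases x with hx | hx | hx | hx | hx <;> simp only [hx] <;> norm_num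
      · -- bucket 0
        rw [
pvInsertBy_skip _ x (pvF 0 u) _ (hskip (pvF 0 u) (by
            intro a ha; have := pvMem_pvF ha; omega)),
          pvInsertBy_front _ x (pvF 1 u ++ (pvF 2 u ++ (pvF 3 u ++ (pvF 4 u)))) (hfront _ (by
            intro a ha
            simp only [List.mem_append] at ha
            rcases ha with h | h | h | h <;> (have := pvMem_pvF h; omega)))]
      · -- bucket 1
        rw [
pvInsertBy_skip _ x (pvF 0 u) _ (hskip (pvF 0 u) (by
            intro a ha; have := pvMem_pvF ha; omega)),
          pvInsertBy_skip _ x (pvF 1 u) _ (hskip (pvF 1 u) (by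
            intro a ha; have := pvMem_pvF ha; omega)),
          pvInsertBy_front _ x (pvF 2 u ++ (pvF 3 u ++ (pvF 4 u))) (hfront _ (by
            intro a ha
            simp only [List.mem_append] at ha
            rcases ha with h | h | h <;> (have := pvMem_pvF h; omega)))]
      · -- bucket 2
        rw [
pvInsertBy_skip _ x (pvF 0 u) _ (hskip (pvF 0 u) (by
            intro a ha; have := pvMem_pvF ha; omega)),
          pvInsertBy_skip _ x (pvF 1 u) _ (hskip (pvF 1 u) (by
            intro a ha; have := pvMem_pvF ha; omega)),
          pvInsertBy_skip _ x (pvF 2 u) _ (hskip (pvF 2 u) (by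
            intro a ha; have := pvMem_pvF ha; omega)),
          pvInsertBy_front _ x (pvF 3 u ++ (pvF 4 u)) (hfront _ (by
            intro a ha
            simp only [List.mem_append] at ha
            rcases ha with h | h <;> (have := pvMem_pvF h; omega)))]
      · -- bucket 3
        rw [
pvInsertBy_skip _ x (pvF 0 u) _ (hskip (pvF 0 u) (by
            intro a ha; have := pvMem_pvF ha; omega)),
          pvInsertBy_skip _ x (pvF 1 u) _ (hskip (pvF 1 u) (by
            intro a ha; have := pvMem_pvF ha; omega)),
          pvInsertBy_skip _ x (pvF 2 u) _ (hskip (pvF 2 u) (by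
            intro a ha; have := pvMem_pvF ha; omega)),
          pvInsertBy_skip _ x (pvF 3 u) _ (hskip (pvF 3 u) (by
            intro a ha; have := pvMem_pvF ha; omega)),
          pvInsertBy_front _ x (pvF 4 u) (hfront _ (by
            intro a ha; have := pvMem_pvF ha; omega))]
      · -- bucket 4
        rw [
pvInsertBy_skip _ x (pvF 0 u) _ (hskip (pvF 0 u) (by
            intro a ha; have := pvMem_pvF ha; omega)),
          pvInsertBy_skip _ x (pvF 1 u) _ (hskip (pvF 1 u) (by
            intro a ha; have := pvMem_pvF ha; omega)),
          pvInsertBy_skip _ x (pvF 2 u) _ (hskip (pvF 2 u) (by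
            intro a ha; have := pvMem_pvF ha; omega)),
          pvInsertBy_skip _ x (pvF 3 u) _ (hskip (pvF 3 u) (by
            intro a ha; have := pvMem_pvF ha; omega)),
          pvInsertBy_last _ x (pvF 4 u) (hskip (pvF 4 u) (by
            intro a ha; have := pvMem_pvF ha; omega))]

-- B's loop tracks A's dedup loop: same seen-set, buckets = filters of A's unique list
theorem pvFold_inv (ms : List (List (String × String)))
    (seen : PySem.Set String) (u : List (List (String × String))) :
    ms.foldl pvBucketStep (seen, pvF 0 u, pvF 1 u, pvF 2 u, pvF 3 u, pvF 4 u) =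
      ((ms.foldl pvDedupStep (seen, u)).1,
        pvF 0 (ms.foldl pvDedupStep (seen, u)).2, pvF 1 (ms.foldl pvDedupStep (seen, u)).2,
        pvF 2 (ms.foldl pvDedupStep (seen, u)).2, pvF 3 (ms.foldl pvDedupStep (seen, u)).2,
        pvF 4 (ms.foldl pvDedupStep (seen, u)).2) := by
  induction ms generalizing seen u with
  | nil => simp
  | cons m ms ih =>
      rw [List.foldl_cons, List.foldl_cons]
      by_cases hc : seen.contains (pvGetKey m "action") = true
      · have e1 : pvBucketStep (seen, pvF 0 u, pvF 1 u, pvF 2 u, pvF 3 u, pvF 4 u) m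
            = (seen, pvF 0 u, pvF 1 u, pvF 2 u, pvF 3 u, pvF 4 u) := by
          dsimp only [pvBucketStep]; rw [hc]; simp
        have e2 : pvDedupStep (seen, u) m = (seen, u) := by
          dsimp only [pvDedupStep]; rw [hc]; simp
        rw [e1, e2]; exact ih seen u
      · rw [Bool.not_eq_true] at hc
        have e2 : pvDedupStep (seen, u) m = (seen.add (pvGetKey m "action"), u ++ [m]) := by
          dsimp only [pvDedupStep]; rw [hc]; simp
        rcases pvKey_cases m with hx | hx | hx | hx | hx <;>
        · have e1 : pvBucketStep (seen, pvF 0 u, pvF 1 u, pvF 2 u, pvF 3 u, pvF 4 u) m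
              = (seen.add (pvGetKey m "action"), pvF 0 (u ++ [m]), pvF 1 (u ++ [m]),
                  pvF 2 (u ++ [m]), pvF 3 (u ++ [m]), pvF 4 (u ++ [m])) := by
            dsimp only [pvBucketStep]; rw [hc]; simp [hx, pvF_append]
          rw [e1, e2]; exact ih _ _

-- ===== VERDICT (by name: the statement is the Claim_ definition above) =====
theorem prioritize_mitigations_py_spec : Claim_equal_prioritize_mitigations_py := by
  intro mitigations _ _
  unfold Spec_prioritize_mitigations_py prioritize_mitigations_py prioritize_mitigations_py_alt
  have h := pvFold_inv mitigations (PySem.Set.ofList []) []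
  simp only [pvF, List.filter_nil] at h
  rw [h]
  simpa using pvSorted_eq_buckets (mitigations.foldl pvDedupStep (PySem.Set.ofList [], [])).2
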